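-- pv_equiv track=rewrite | github.com/licwukstartup-star/propval-mvp | backend/services/ai_service.py | _parse_single_section
-- ===== SOURCE A (Python) =====
-- def _parse_single_section(text: str) -> str:
--     """Extract body text from a single-section AI response.
--
--     Strips any leading heading line but preserves paragraph breaks
--     (double newlines) so multi-paragraph output stays structured.
--     """
--     paragraphs: list[list[str]] = [[]]
--     past_heading = False
--     for line in text.split("\n"):
--         stripped = line.strip()
--         if not stripped:
--             # Empty line = paragraph break (only if we have content)
--             if paragraphs[-1]:
--                 paragraphs.append([])
--             continue
--         # Skip heading-like lines (all caps, numbered, short) at the very start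
--         if not past_heading and (stripped.isupper() or stripped[0].isdigit()) and len(stripped) < 80:
--             past_heading = True
--             continue
--         if not past_heading and stripped.startswith("#"):
--             past_heading = True
--             continue
--         past_heading = True
--         paragraphs[-1].append(stripped)
--     # Join lines within each paragraph, then join paragraphs with double newline
--     result = "\n\n".join(" ".join(p) for p in paragraphs if p)
--     return result.strip()
-- ===== SOURCE B (Python) =====
-- def _parse_single_section(text: str) -> str:
--     # Enumerate stripped lines, keep only the non-blank ones with their line numbers.
--     kept = [(i, s) for i, s in enumerate(line.strip() for line in text.split("\n")) if s]
--     # Drop the first kept line when it looks like a heading.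
--     if kept:
--         first = kept[0][1]
--         if ((first.isupper() or first[0].isdigit()) and len(first) < 80) or first.startswith("#"):
--             kept = kept[1:]
--     # Join: a line-number gap of exactly 1 means same paragraph (single space),
--     # a larger gap means blank lines stood between them (paragraph break).
--     out = ""
--     prev = None
--     for i, s in kept:
--         if prev is None:
--             out = s
--         else:
--             out += (" " if i == prev + 1 else "\n\n") + s
--         prev = i
--     return out.strip()
-- ===== Notes on version B (the rewrite author's own statement) =====
-- stated objective: alternative
-- what changed: Instead of A's stateful fold that appends into paragraphs[-1] under a past_heading flag, B filters the enumerated stripped lines down to the non-blank ones (dropping a heading-like first one) and joins them directly, picking each separator from the line-number gap: gap 1 gives a space, a larger gap gives a paragraph break.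
import Mathlib
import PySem

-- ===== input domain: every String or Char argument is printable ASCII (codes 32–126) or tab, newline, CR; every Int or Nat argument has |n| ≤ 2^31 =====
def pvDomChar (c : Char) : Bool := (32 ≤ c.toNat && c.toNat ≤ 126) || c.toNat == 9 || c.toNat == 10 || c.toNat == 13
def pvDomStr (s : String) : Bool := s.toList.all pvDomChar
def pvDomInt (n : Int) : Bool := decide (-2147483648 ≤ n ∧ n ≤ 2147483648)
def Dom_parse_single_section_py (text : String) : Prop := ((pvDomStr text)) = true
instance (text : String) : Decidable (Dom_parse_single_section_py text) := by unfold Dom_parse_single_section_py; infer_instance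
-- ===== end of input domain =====

-- B replaces A's stateful paragraph-accumulating fold by a filter-and-join over
-- line-numbered lines: keep non-blank stripped lines with their indices, drop a
-- heading-like first one, and choose each joiner (" " vs "\n\n") from the index gap.
-- Alternative decomposition, same cost. Return values proved equal on Dom.

-- str.isupper(): some cased char and no lowercase one — exact on the ASCII domain above.
def pvStrIsupper (cs : List Char) : Bool :=
  cs.any PySem.Chars.isupper && !cs.any PySem.Chars.islower

-- ===== PORT A =====
-- paragraphs[-1].append(s) on the always-nonempty paragraph list
def pvAppendLast (ps : List (List String)) (s : String) : List (List String) :=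
  match ps with
  | [] => [[s]]
  | [p] => [p ++ [s]]
  | p :: rest => p :: pvAppendLast rest s

def pvStepA (st : List (List String) × Bool) (line : String) : List (List String) × Bool :=
  let stripped := PySem.Str.strip line
  if stripped.isEmpty then
    if !((st.1.getLast?.getD []).isEmpty) then (st.1 ++ [[]], st.2) else st
  else if !st.2 && ((pvStrIsupper stripped.toList
        || ((PySem.Str.pyGet? stripped 0).map PySem.Chars.isdigit).getD false)
        && decide (PySem.Str.len stripped < 80)) then
    (st.1, true)
  else if !st.2 && PySem.Str.startswith stripped "#" then
    (st.1, true)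
  else
    (pvAppendLast st.1 stripped, true)

-- text.split("\n"): split? is some, the separator "\n" is nonempty
def parse_single_section_py (text : String) : String :=
  let st := ((PySem.Str.split? text "\n").getD []).foldl pvStepA ([([] : List String)], false)
  PySem.Str.strip (PySem.Str.join "\n\n"
    ((st.1.filter (fun p => !p.isEmpty)).map (fun p => PySem.Str.join " " p)))

-- ===== PORT B =====
-- the combined heading test on the first kept line
def pvHeadingLike (s : String) : Bool :=
  ((pvStrIsupper s.toList
      || ((PySem.Str.pyGet? s 0).map PySem.Chars.isdigit).getD false)
    && decide (PySem.Str.len s < 80))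
  || PySem.Str.startswith s "#"

-- Python's enumerate(...) over the stripped lines, giving int line numbers (hand port, exact)
def pvEnumFrom (n : Int) : List String → List (Int × String)
  | [] => []
  | s :: t => (n, s) :: pvEnumFrom (n + 1) t

-- one step of B's joining loop: state = (out, prev)
def pvStepB (st : String × Option Int) (q : Int × String) : String × Option Int :=
  match st.2 with
  | none => (q.2, some q.1)
  | some prev => (st.1 ++ (if q.1 == prev + 1 then " " else "\n\n") ++ q.2, some q.1)

-- text.split("\n"): split? is some, the separator "\n" is nonempty
def parse_single_section_py_alt (text : String) : String :=
  let lines := ((PySem.Str.split? text "\n").getD []).map PySem.Str.strip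
  let kept := (pvEnumFrom 0 lines).filter (fun q => !q.2.isEmpty)
  let kept2 : List (Int × String) :=
    match kept with
    | [] => []
    | (i, s) :: t => if pvHeadingLike s then t else (i, s) :: t
  PySem.Str.strip ((kept2.foldl pvStepB ("", none)).1)

-- ===== PRECONDITION & SPEC =====
def Spec_parse_single_section_py (text : String) (out : String) : Prop := out = parse_single_section_py_alt text
instance (text : String) (out : String) : Decidable (Spec_parse_single_section_py text out) := by unfold Spec_parse_single_section_py; infer_instance

-- ===== CLAIM (what is proved, stated in full; the proofs are below) =====
def Claim_equal_parse_single_section_py : Prop := ∀ (text : String), Dom_parse_single_section_py text → Spec_parse_single_section_py text (parse_single_section_py text)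

-- ===== LEMMAS AND PROOFS =====

-- proof-only: grouping of consecutive non-blank lines into paragraphs (the common spec)
def pvGroup : List String → List String → List (List String) → List (List String)
  | [], cur, acc => if !cur.isEmpty then acc ++ [cur] else acc
  | s :: rest, cur, acc =>
    if !s.isEmpty then pvGroup rest (cur ++ [s]) acc
    else if !cur.isEmpty then pvGroup rest [] (acc ++ [cur])
    else pvGroup rest [] acc

-- proof-only: the rendered text of a paragraph list
def pvRender (gs : List (List String)) : String :=
  PySem.Str.join "\n\n" (gs.map (fun p => PySem.Str.join " " p))

-- ---- A-side characterisation: A's fold produces pvGroup of the stripped lines ----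
theorem appendLast_concat (acc : List (List String)) (cur : List String) (s : String) :
    pvAppendLast (acc ++ [cur]) s = acc ++ [cur ++ [s]] := by
  induction acc with
  | nil => rfl
  | cons a t ih =>
    cases t with
    | nil => simp [pvAppendLast]
    | cons b u => simp [pvAppendLast] at ih ⊢; simpa using ih

theorem stepA_blank (st : List (List String) × Bool) (l : String)
    (h : (PySem.Str.strip l).isEmpty = true) :
    pvStepA st l =
      if !((st.1.getLast?.getD []).isEmpty) then (st.1 ++ [[]], st.2) else st := by
  simp only [pvStepA, h]; rfl

theorem stepA_content (st : List (List String) × Bool) (l : String)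
    (h : (PySem.Str.strip l).isEmpty = false) (hp : st.2 = true) :
    pvStepA st l = (pvAppendLast st.1 (PySem.Str.strip l), true) := by
  simp only [pvStepA, h, hp]
  rfl

theorem stepA_first (ps : List (List String)) (l : String)
    (h : (PySem.Str.strip l).isEmpty = false) :
    pvStepA (ps, false) l =
      if pvHeadingLike (PySem.Str.strip l) then (ps, true)
      else (pvAppendLast ps (PySem.Str.strip l), true) := by
  rw [pvStepA, pvHeadingLike]
  simp only [h]
  cases h1 : ((pvStrIsupper (PySem.Str.strip l).toList
        || ((PySem.Str.pyGet? (PySem.Str.strip l) 0).map PySem.Chars.isdigit).getD false)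
        && decide (PySem.Str.len (PySem.Str.strip l) < 80)) with
  | true => rfl
  | false =>
    cases h2 : PySem.Str.startswith (PySem.Str.strip l) "#" with
    | true => rfl
    | false => rfl

theorem loopA_eq_group (ls : List String) :
    ∀ (cur : List String) (acc : List (List String)), (∀ p ∈ acc, p ≠ []) →
    ((ls.foldl pvStepA (acc ++ [cur], true)).1).filter (fun p => !p.isEmpty)
      = pvGroup (ls.map PySem.Str.strip) cur acc := by
  induction ls with
  | nil =>
    intro cur acc h
    have hacc : acc.filter (fun p => !p.isEmpty) = acc :=
      List.filter_eq_self.mpr (fun p hp => by simpa [List.isEmpty_iff] using h p hp)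
    by_cases hc : cur = [] <;>
      simp [pvGroup, List.filter_append, hacc, hc]
  | cons l rest ih =>
    intro cur acc h
    cases hs : (PySem.Str.strip l).isEmpty with
    | true =>
      by_cases hc : cur = []
      · have hlast : (((acc ++ [cur]).getLast?.getD []).isEmpty) = true := by
          simp [hc]
        simpa [List.foldl_cons, stepA_blank _ _ hs, hlast, pvGroup, hs, hc]
          using ih [] acc h
      · have h' : ∀ p ∈ acc ++ [cur], p ≠ [] := by
          intro p hp; rcases List.mem_append.mp hp with h1 | h1
          · exact h p h1
          · simp at h1; simpa [h1] using hc
        have hne : (((acc ++ [cur]).getLast?.getD []).isEmpty) = false := by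
          simp [hc]
        have := ih [] (acc ++ [cur]) h'
        simpa [List.foldl_cons, stepA_blank _ _ hs, hne, pvGroup, hs, hc,
               List.append_assoc] using this
    | false =>
      rw [List.foldl_cons, stepA_content (acc ++ [cur], true) l hs rfl,
          appendLast_concat, List.map_cons]
      simp only [pvGroup, hs, Bool.not_false, if_true]
      exact ih (cur ++ [PySem.Str.strip l]) acc h

theorem foldA_eq_body (ls : List String) :
    ((ls.foldl pvStepA ([([] : List String)], false)).1).filter (fun p => !p.isEmpty)
      = pvGroup
          (match (ls.map PySem.Str.strip).dropWhile (fun s => s.isEmpty) with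
           | [] => []
           | s :: t => if pvHeadingLike s then t else s :: t) [] [] := by
  induction ls with
  | nil => rfl
  | cons l rest ih =>
    rw [List.foldl_cons, List.map_cons]
    cases hs : (PySem.Str.strip l).isEmpty with
    | true =>
      have hstep : pvStepA ([([] : List String)], false) l = ([[]], false) := by
        rw [stepA_blank _ _ hs]; rfl
      rw [hstep, List.dropWhile_cons_of_pos (by simpa using hs)]
      exact ih
    | false =>
      rw [List.dropWhile_cons_of_neg (by simp [hs])]
      cases hh : pvHeadingLike (PySem.Str.strip l) with
      | true =>
        have hstep : pvStepA ([([] : List String)], false) l = ([[]], true) := by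
          rw [stepA_first _ _ hs]; simp [hh]
        rw [hstep]
        have hmain := loopA_eq_group rest [] [] (by simp)
        simpa [hh] using hmain
      | false =>
        have hstep : pvStepA ([([] : List String)], false) l = ([[PySem.Str.strip l]], true) := by
          rw [stepA_first _ _ hs]; simp [hh, pvAppendLast]
        rw [hstep]
        have hmain := loopA_eq_group rest [PySem.Str.strip l] [] (by simp)
        simpa [hh, pvGroup, hs] using hmain

-- ---- join/render algebra ----
theorem cjoin_append (sep : List Char) (l : List (List Char)) (x : List Char) (h : l ≠ []) :
    PySem.Chars.join sep (l ++ [x]) = PySem.Chars.join sep l ++ sep ++ x := by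
  induction l with
  | nil => exact absurd rfl h
  | cons a as ih =>
    cases as with
    | nil => simp [PySem.Chars.join_cons_cons, PySem.Chars.join_singleton]
    | cons b bs =>
      simp only [List.cons_append] at ih ⊢
      rw [PySem.Chars.join_cons_cons, PySem.Chars.join_cons_cons, ih (by simp)]
      simp [List.append_assoc]

theorem sjoin_append (sep : String) (l : List String) (x : String) (h : l ≠ []) :
    PySem.Str.join sep (l ++ [x]) = PySem.Str.join sep l ++ sep ++ x := by
  apply String.toList_inj.mp
  simp only [PySem.Str.toList_join, List.map_append, List.map_cons, List.map_nil]
  rw [cjoin_append _ _ _ (by simpa using h)]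
  simp

theorem sjoin_single (sep : String) (x : String) :
    PySem.Str.join sep [x] = x := by
  apply String.toList_inj.mp
  simp [PySem.Str.toList_join, PySem.Chars.join_singleton]

theorem render_append (acc : List (List String)) (g : List String) (h : acc ≠ []) :
    pvRender (acc ++ [g]) = pvRender acc ++ "\n\n" ++ PySem.Str.join " " g := by
  unfold pvRender
  rw [List.map_append, List.map_singleton, sjoin_append _ _ _ (by simpa using h)]

theorem render_single (g : List String) :
    pvRender [g] = PySem.Str.join " " g := by
  unfold pvRender
  rw [List.map_singleton, sjoin_single]

theorem render_concat_last (acc : List (List String)) (cur : List String) (s : String)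
    (h : cur ≠ []) :
    pvRender (acc ++ [cur ++ [s]]) = pvRender (acc ++ [cur]) ++ " " ++ s := by
  by_cases ha : acc = []
  · subst ha
    simp only [List.nil_append, render_single]
    rw [sjoin_append _ _ _ h]
  · rw [render_append _ _ ha, render_append _ _ ha, sjoin_append _ _ _ h]
    simp [String.append_assoc]

-- ---- B-side: the gap-join fold produces pvRender ∘ pvGroup ----
theorem foldB_group (ls : List String) :
    ∀ (n : Int) (cur : List String) (acc : List (List String)) (st : String × Option Int),
    ((cur = [] ∧ acc = [] ∧ st = ("", none)) ∨
     (cur ≠ [] ∧ st = (pvRender (acc ++ [cur]), some (n - 1))) ∨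
     (cur = [] ∧ acc ≠ [] ∧ ∃ p : Int, p + 2 ≤ n ∧ st = (pvRender acc, some p))) →
    ((((pvEnumFrom n ls).filter (fun q => !q.2.isEmpty)).foldl pvStepB st).1)
      = pvRender (pvGroup ls cur acc) := by
  induction ls with
  | nil =>
    intro n cur acc st hinv
    rcases hinv with ⟨hc, ha, hst⟩ | ⟨hc, hst⟩ | ⟨hc, _, p, _, hst⟩
    · subst hc; subst ha; subst hst
      simp [pvEnumFrom, pvGroup, pvRender, PySem.Str.join, PySem.Chars.join, List.intercalate]
    · subst hst
      simp [pvEnumFrom, pvGroup, hc]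
    · subst hc; subst hst
      simp [pvEnumFrom, pvGroup]
  | cons l rest ih =>
    intro n cur acc st hinv
    cases hs : l.isEmpty with
    | true =>
      have hfil : (pvEnumFrom n (l :: rest)).filter (fun q => !q.2.isEmpty)
          = (pvEnumFrom (n + 1) rest).filter (fun q => !q.2.isEmpty) := by
        simp [pvEnumFrom, hs]
      rw [hfil]
      rcases hinv with ⟨hc, ha, hst⟩ | ⟨hc, hst⟩ | ⟨hc, hane, p, hp, hst⟩
      · subst hc; subst ha
        have : pvGroup (l :: rest) [] [] = pvGroup rest [] [] := by
          simp [pvGroup, hs]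
        rw [this]
        exact ih (n + 1) [] [] st (Or.inl ⟨rfl, rfl, hst⟩)
      · have : pvGroup (l :: rest) cur acc = pvGroup rest [] (acc ++ [cur]) := by
          simp [pvGroup, hs, hc]
        rw [this]
        exact ih (n + 1) [] (acc ++ [cur]) st
          (Or.inr (Or.inr ⟨rfl, by simp, n - 1, by omega, hst⟩))
      · subst hc
        have : pvGroup (l :: rest) [] acc = pvGroup rest [] acc := by
          simp [pvGroup, hs]
        rw [this]
        exact ih (n + 1) [] acc st (Or.inr (Or.inr ⟨rfl, hane, p, by omega, hst⟩))
    | false =>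
      have hfil : (pvEnumFrom n (l :: rest)).filter (fun q => !q.2.isEmpty)
          = (n, l) :: (pvEnumFrom (n + 1) rest).filter (fun q => !q.2.isEmpty) := by
        simp [pvEnumFrom, hs]
      have hgrp : pvGroup (l :: rest) cur acc = pvGroup rest (cur ++ [l]) acc := by
        simp [pvGroup, hs]
      rw [hfil, List.foldl_cons, hgrp]
      rcases hinv with ⟨hc, ha, hst⟩ | ⟨hc, hst⟩ | ⟨hc, hane, p, hp, hst⟩
      · subst hc; subst ha; subst hst
        have hstep : pvStepB ("", none) (n, l) = (l, some n) := rfl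
        rw [hstep]
        exact ih (n + 1) [l] [] (l, some n)
          (Or.inr (Or.inl ⟨by simp, by simp [render_single, sjoin_single]⟩))
      · subst hst
        have hstep : pvStepB (pvRender (acc ++ [cur]), some (n - 1)) (n, l)
            = (pvRender (acc ++ [cur]) ++ " " ++ l, some n) := by
          simp [pvStepB]
        rw [hstep]
        exact ih (n + 1) (cur ++ [l]) acc
          (pvRender (acc ++ [cur]) ++ " " ++ l, some n)
          (Or.inr (Or.inl ⟨by simp, by
            rw [render_concat_last _ _ _ hc]; simp⟩))
      · subst hc; subst hst
        have hstep : pvStepB (pvRender acc, some p) (n, l)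
            = (pvRender acc ++ "\n\n" ++ l, some n) := by
          have : (n == p + 1) = false := by
            simp only [beq_eq_false_iff_ne, ne_eq]
            omega
          simp [pvStepB, this]
        rw [hstep]
        exact ih (n + 1) [l] acc (pvRender acc ++ "\n\n" ++ l, some n)
          (Or.inr (Or.inl ⟨by simp, by
            rw [render_append _ _ hane, sjoin_single]; simp⟩))

theorem foldB_body (ls : List String) : ∀ (n : Int),
    (((match (pvEnumFrom n ls).filter (fun (q : Int × String) => !q.2.isEmpty) with
       | [] => ([] : List (Int × String))
       | (i, s) :: t => if pvHeadingLike s then t else (i, s) :: t).foldl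
        pvStepB ("", none)).1)
      = pvRender (pvGroup
          (match ls.dropWhile (fun s => s.isEmpty) with
           | [] => []
           | s :: t => if pvHeadingLike s then t else s :: t) [] []) := by
  induction ls with
  | nil =>
    intro n
    simp [pvEnumFrom, pvGroup, pvRender, PySem.Str.join, PySem.Chars.join, List.intercalate]
  | cons l rest ih =>
    intro n
    cases hs : l.isEmpty with
    | true =>
      have hfil : (pvEnumFrom n (l :: rest)).filter (fun q => !q.2.isEmpty)
          = (pvEnumFrom (n + 1) rest).filter (fun q => !q.2.isEmpty) := by
        simp [pvEnumFrom, hs]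
      rw [hfil, List.dropWhile_cons_of_pos (by simpa using hs)]
      exact ih (n + 1)
    | false =>
      have hfil : (pvEnumFrom n (l :: rest)).filter (fun q => !q.2.isEmpty)
          = (n, l) :: (pvEnumFrom (n + 1) rest).filter (fun q => !q.2.isEmpty) := by
        simp [pvEnumFrom, hs]
      rw [hfil, List.dropWhile_cons_of_neg (by simp [hs])]
      cases hh : pvHeadingLike l with
      | true =>
        simp only [hh, if_true]
        exact foldB_group rest (n + 1) [] [] ("", none) (Or.inl ⟨rfl, rfl, rfl⟩)
      | false =>
        simp only [hh, Bool.false_eq_true, if_false, List.foldl_cons]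
        have hstep : pvStepB ("", none) (n, l) = (l, some n) := rfl
        rw [hstep]
        have hgrp : pvGroup (l :: rest) [] [] = pvGroup rest [l] [] := by
          simp [pvGroup, hs]
        rw [hgrp]
        exact foldB_group rest (n + 1) [l] [] (l, some n)
          (Or.inr (Or.inl ⟨by simp, by simp [render_single, sjoin_single]⟩))

-- ===== VERDICT (by name: the statement is the Claim_ definition above) =====
theorem parse_single_section_py_spec : Claim_equal_parse_single_section_py := by
  intro text _
  simp only [Spec_parse_single_section_py, parse_single_section_py,
             parse_single_section_py_alt]
  rw [foldA_eq_body, foldB_body, pvRender]
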